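-- pv_equiv track=rewrite | github.com/miliar/Code_Jam_Webscraper | solutions_python/solutions_year10_round2_nr2/147.py | swapIntoBarn
-- ===== SOURCE A (Python) =====
-- def swapIntoBarn(nth, barnPos, potentials):
-- 	swapCnt = -1
-- 	chickCnt = len(potentials)
-- 	for i in range(nth+1, chickCnt):
-- 		if potentials[i] >= barnPos:
-- 			swapCnt = i - nth
-- 			break
-- 	if swapCnt != -1:
-- 		while i > nth:
-- 			tmp = potentials[i]
-- 			potentials[i] = potentials[i-1]
-- 			potentials[i-1] = tmp
-- 			i = i - 1
-- 	return swapCnt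
-- ===== SOURCE B (Python) =====
-- def swapIntoBarn(nth, barnPos, potentials):
--     first = None
--     for i in range(len(potentials) - 1, nth, -1):
--         if potentials[i] >= barnPos:
--             first = i
--     if first is None:
--         return -1
--     potentials.insert(nth, potentials.pop(first))
--     return first - nth
-- ===== Notes on version B (the rewrite author's own statement) =====
-- stated objective: alternative
-- what changed: A scans forward with a flag and break, then bubbles the element into place with an adjacent-swap while loop; B scans the range right-to-left with a keep-last accumulator (no break, the last qualifying index seen is the leftmost one) and performs the rotation as a single pop/insert, so both of A's loops disappear.
import Mathlib
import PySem

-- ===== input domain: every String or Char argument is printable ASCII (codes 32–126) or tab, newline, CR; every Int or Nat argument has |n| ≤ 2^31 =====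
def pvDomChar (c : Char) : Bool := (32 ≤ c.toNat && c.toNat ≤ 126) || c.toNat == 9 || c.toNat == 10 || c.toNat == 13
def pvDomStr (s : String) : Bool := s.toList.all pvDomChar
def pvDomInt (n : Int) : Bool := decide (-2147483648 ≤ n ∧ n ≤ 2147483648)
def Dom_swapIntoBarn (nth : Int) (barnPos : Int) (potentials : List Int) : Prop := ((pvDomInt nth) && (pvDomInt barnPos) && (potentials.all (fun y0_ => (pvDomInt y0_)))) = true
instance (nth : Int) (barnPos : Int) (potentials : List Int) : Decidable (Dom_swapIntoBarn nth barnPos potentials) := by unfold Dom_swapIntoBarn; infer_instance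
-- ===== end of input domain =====

-- B replaces A's forward break-scan and adjacent-swap bubbling loop by a right-to-left scan with a
-- keep-last accumulator (the last qualifying index seen going leftwards is the first one) and one
-- pop/insert rotation (objective: alternative decomposition).
-- Both Pythons mutate `potentials` in place; only the RETURN value is claimed equal here (the
-- mutations coincide for 0 ≤ nth; for negative nth A's wraparound swaps and B's insert differ).

-- ===== PORT A =====
-- the for-loop with break: swapCnt stays -1 until a hit, then it is set and the loop breaks.
-- The subsequent while loop only swaps elements of the caller's list; swapCnt is unchanged by it,
-- so the returned value is the result of this scan.
def pvALoop (nth : Int) (barnPos : Int) (potentials : List Int) (swapCnt : Int) : List Int → Int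
  | [] => swapCnt
  | i :: rest =>
      if PySem.List.pyGetD potentials i 0 ≥ barnPos then i - nth
      else pvALoop nth barnPos potentials swapCnt rest

def swapIntoBarn (nth : Int) (barnPos : Int) (potentials : List Int) : Int :=
  pvALoop nth barnPos potentials (-1)
    (PySem.List.pyRange (nth + 1) (potentials.length : Int) 1)

-- ===== PORT B =====
-- first = None; for i in range(len-1, nth, -1): if potentials[i] >= barnPos: first = i
-- (keep-last accumulator over the countdown range); then -1 if first is None else first - nth
-- (the pop/insert only mutates the caller's list, not the return value).
def swapIntoBarn_alt (nth : Int) (barnPos : Int) (potentials : List Int) : Int :=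
  let first : Option Int :=
    (PySem.List.pyRange ((potentials.length : Int) - 1) nth (-1)).foldl
      (fun acc i => if PySem.List.pyGetD potentials i 0 ≥ barnPos then some i else acc) none
  match first with
  | none => -1
  | some i => i - nth

-- ===== PRECONDITION & SPEC =====
-- Pre_ is exactly where the Python A returns: below nth = -len A's first index lookup raises
-- IndexError, and at nth = -len - 1 the trailing while loop raises as soon as a qualifying
-- element exists (so that case is admitted only when every element is < barnPos).
def Pre_swapIntoBarn (nth : Int) (barnPos : Int) (potentials : List Int) : Prop :=
  nth ≥ -(potentials.length : Int) ∨
    (nth = -(potentials.length : Int) - 1 ∧ ∀ x ∈ potentials, x < barnPos)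
instance (nth : Int) (barnPos : Int) (potentials : List Int) : Decidable (Pre_swapIntoBarn nth barnPos potentials) := by unfold Pre_swapIntoBarn; infer_instance

def pvWitness_swapIntoBarn : Int × Int × List Int := (0, 5, [3, 7, 2])

def Spec_swapIntoBarn (nth : Int) (barnPos : Int) (potentials : List Int) (out : Int) : Prop := out = swapIntoBarn_alt nth barnPos potentials
instance (nth : Int) (barnPos : Int) (potentials : List Int) (out : Int) : Decidable (Spec_swapIntoBarn nth barnPos potentials out) := by unfold Spec_swapIntoBarn; infer_instance

-- ===== CLAIM (what is proved, stated in full; the proofs are below) =====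
def Claim_equal_swapIntoBarn : Prop := ∀ (nth : Int) (barnPos : Int) (potentials : List Int), Dom_swapIntoBarn nth barnPos potentials → Pre_swapIntoBarn nth barnPos potentials → Spec_swapIntoBarn nth barnPos potentials (swapIntoBarn nth barnPos potentials)

-- ===== LEMMAS AND PROOFS =====
-- A's break-scan over any index list equals "first qualifying element, minus nth".
theorem pvALoop_eq_find (nth barnPos : Int) (potentials : List Int) (l : List Int) :
    pvALoop nth barnPos potentials (-1) l =
      (match l.find? (fun i => PySem.List.pyGetD potentials i 0 ≥ barnPos) with
        | none => (-1 : Int)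
        | some i => i - nth) := by
  induction l with
  | nil => rfl
  | cons i rest ih =>
      by_cases h : PySem.List.pyGetD potentials i 0 ≥ barnPos
      · simp [pvALoop, List.find?, h]
      · simp [pvALoop, List.find?, h, ih]

-- B's keep-last fold over the REVERSE of a list is the first match of the list.
theorem keeplast_reverse_eq_find (p : Int → Prop) [DecidablePred p] (l : List Int) (a : Option Int) :
    l.reverse.foldl (fun acc i => if p i then some i else acc) a =
      (match l.find? (fun i => decide (p i)) with
        | none => a
        | some i => some i) := by
  induction l generalizing a with
  | nil => rfl
  | cons x t ih =>
      by_cases h : p x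
      · simp [List.find?, h, List.foldl_append, ih]
      · simp [List.find?, h, List.foldl_append, ih]

-- ===== VERDICT (by name: the statement is the Claim_ definition above) =====
theorem swapIntoBarn_spec : Claim_equal_swapIntoBarn := by
  intro nth barnPos potentials _ _
  unfold Spec_swapIntoBarn swapIntoBarn swapIntoBarn_alt
  rw [pvALoop_eq_find, PySem.List.pyRange_neg_one_eq_reverse,
    keeplast_reverse_eq_find (fun i => PySem.List.pyGetD potentials i 0 ≥ barnPos),
    show (potentials.length : Int) - 1 + 1 = (potentials.length : Int) by ring]
  cases (PySem.List.pyRange (nth + 1) (potentials.length : Int) 1).find?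
      (fun i => decide (PySem.List.pyGetD potentials i 0 ≥ barnPos)) <;> rfl
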